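-- pv_equiv track=rewrite | github.com/Kawser-nerd/CLCDSA | Source Codes/AtCoder/arc092/C/2714870.py | calc
-- ===== SOURCE A (Python) =====
-- def calc(A):
--     if len(A) == 1:
--         return [], A[0]
--     res = []
--     if len(A) % 2 == 0:
--         res.append(len(A))
--         A = A[:-1]
--     if all(a <= 0 for a in A[::2]):
--         ma = max(A[::2])
--         i = 0
--         while A[i] != ma:
--             i += 1
--             res.append(1)
--         j = len(A)
--         while i < j-1:
--             res.append(j-i)
--             j -= 1
--         return res, ma
--
--     l = 0; r = len(A)
--     while A[0] < 0:
--         res.append(1)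
--         res.append(1)
--         A = A[2:]
--     v = 0
--     while len(A) > 2:
--         if A[2] < 0:
--             res.append(3)
--             if len(A) > 4:
--                 A = A[:2] + A[4:]
--             else:
--                 A = A[:2]
--         else:
--             res.append(2)
--             A[2] += A[0]
--             A = A[2:]
--     if len(A) > 1:
--         res.append(2)
--     return res, A[0]
-- ===== SOURCE B (Python) =====
-- def calc(A):
--     if len(A) == 1:
--         return [], A[0]
--     res = []
--     n = len(A)
--     if n % 2 == 0:
--         res.append(n)
--         n -= 1
--     evens = A[0:n:2]
--     if all(e <= 0 for e in evens):
--         ma = max(evens)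
--         i = A.index(ma)
--         res += [1] * i
--         res += [n - i - t for t in range(n - i - 1)]
--         return res, ma
--     m = 0
--     while evens[m] < 0:
--         m += 1
--     res += [1, 1] * m
--     acc = evens[m]
--     cs = evens[m + 1:]
--     for c in cs:
--         if c < 0:
--             res.append(3)
--         else:
--             res.append(2)
--             acc += c
--     if cs and cs[-1] < 0:
--         res.append(2)
--     return res, acc
-- ===== Notes on version B (the rewrite author's own statement) =====
-- stated objective: faster
-- what changed: B replaces A's repeated O(n) list slicing and rebuilding (A = A[2:], A = A[:2] + A[4:], A[2] += A[0]) with a single pass over the step-2 slice of the array using an index pointer and a running accumulator, and replaces A's element-by-element countdown loops with direct list arithmetic.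
import Mathlib
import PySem

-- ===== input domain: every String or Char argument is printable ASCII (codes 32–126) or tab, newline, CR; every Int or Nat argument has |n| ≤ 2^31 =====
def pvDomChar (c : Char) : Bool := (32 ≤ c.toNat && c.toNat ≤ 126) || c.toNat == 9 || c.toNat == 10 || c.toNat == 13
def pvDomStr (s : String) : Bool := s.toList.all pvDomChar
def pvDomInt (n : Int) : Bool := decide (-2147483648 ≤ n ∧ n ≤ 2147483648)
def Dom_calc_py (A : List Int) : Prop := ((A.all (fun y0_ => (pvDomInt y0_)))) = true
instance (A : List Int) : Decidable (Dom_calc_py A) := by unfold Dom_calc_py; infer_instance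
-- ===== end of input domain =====

-- B is a one-pass re-implementation of A (pointer + accumulator instead of repeated slicing); return values proved equal for A ≠ [].
-- NOTE: Python A mutates its argument in place on some inputs (A[2] += A[0] before rebinding); B does not; the equivalence proved here is about the RETURN value only.

-- ===== PORT A =====

-- shared primitive: port of Python's step-2 slice xs[::2] / xs[0:n:2] (exact: every second element from index 0; PySem.List.slice has no step parameter)
def pyStep2 : List Int → List Int
  | [] => []
  | [x] => [x]
  | x :: _ :: t => x :: pyStep2 t

-- while A[i] != ma: i += 1; res.append(1)   (walks the list from position i; [] = Python IndexError, unreachable since ma ∈ A)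
def aScan (ma : Int) : List Int → Nat → List Int → Nat × List Int
  | [], i, res => (i, res)
  | a :: t, i, res => if a = ma then (i, res) else aScan ma t (i + 1) (res ++ [1])

-- j = len(A); while i < j-1: res.append(j-i); j -= 1
def aJLoop (i : Nat) : Nat → List Int → List Int
  | j, res => if i < j - 1 then aJLoop i (j - 1) (res ++ [(j : Int) - (i : Int)]) else res
  termination_by j _ => j
  decreasing_by omega

-- while A[0] < 0: res.append(1); res.append(1); A = A[2:]   ([] = Python IndexError, unreachable in context)
def aNegLoop : List Int → List Int → List Int × List Int
  | [], res => ([], res)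
  | a :: t, res => if a < 0 then aNegLoop (t.drop 1) (res ++ [1, 1]) else (a :: t, res)
  termination_by l _ => l.length
  decreasing_by simp

-- while len(A) > 2: …  (A[:2]+A[4:] = a0::a1::rest.drop 1; A[2:] after A[2]+=A[0] = (a2+a0)::rest)
def aMainLoop : List Int → List Int → List Int × List Int
  | a0 :: a1 :: a2 :: rest, res =>
      if a2 < 0 then
        if rest.length + 3 > 4 then aMainLoop (a0 :: a1 :: rest.drop 1) (res ++ [3])
        else aMainLoop [a0, a1] (res ++ [3])
      else aMainLoop ((a2 + a0) :: rest) (res ++ [2])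
  | l, res => (l, res)
  termination_by l _ => l.length
  decreasing_by all_goals (simp; try omega)

def calc_py (A : List Int) : List Int × Int :=
  if A.length = 1 then ([], (PySem.List.pyGet? A 0).getD 0)
  else
    let st := if A.length % 2 = 0 then (([(A.length : Int)] : List Int), A.dropLast) else (([] : List Int), A)
    -- A[:-1] ported as dropLast (= PySem.List.slice A none (some (-1)), lemma slice_to_neg_one)
    let res := st.1
    let B := st.2
    let evens := pyStep2 B
    if evens.all (fun a => a ≤ 0) then
      let ma := (PySem.List.max? evens (fun y => y)).getD 0   -- max(A[::2]); evens ≠ [] under Pre_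
      let s := aScan ma B 0 res
      (aJLoop s.1 B.length s.2, ma)
    else
      let q := aNegLoop B res
      let r := aMainLoop q.1 q.2
      (if r.1.length > 1 then r.2 ++ [2] else r.2, (PySem.List.pyGet? r.1 0).getD 0)

-- ===== PORT B =====

-- while evens[m] < 0: m += 1   (walks evens; running off the end = Python IndexError, unreachable in context)
def bWhileM : List Int → Nat → Nat
  | [], m => m
  | e :: t, m => if e < 0 then bWhileM t (m + 1) else m

-- for c in cs: append 3 / append 2 and acc += c
def bFor (cs : List Int) (res : List Int) (acc : Int) : List Int × Int :=
  cs.foldl (fun st c => if c < 0 then (st.1 ++ [3], st.2) else (st.1 ++ [2], st.2 + c)) (res, acc)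

def calc_py_alt (A : List Int) : List Int × Int :=
  if A.length = 1 then ([], (PySem.List.pyGet? A 0).getD 0)
  else
    let n := if A.length % 2 = 0 then A.length - 1 else A.length
    let res : List Int := if A.length % 2 = 0 then [(A.length : Int)] else []
    let evens := pyStep2 (A.take n)   -- evens = A[0:n:2]
    if evens.all (fun e => e ≤ 0) then
      let ma := (PySem.List.max? evens (fun y => y)).getD 0
      let i := (PySem.List.index? (A.take n) ma).getD 0   -- A[:n].index(ma); found under Pre_
      (res ++ List.replicate i (1 : Int)
           ++ (PySem.List.pyRange 0 ((n : Int) - (i : Int) - 1) 1).map (fun t => (n : Int) - (i : Int) - t), ma)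
    else
      let m := bWhileM evens 0
      let res := res ++ (List.replicate m ([1, 1] : List Int)).flatten   -- res += [1,1]*m
      let acc := ((PySem.List.pyGet? evens (m : Int)).getD 0 : Int)     -- evens[m]; in range in context
      let cs := evens.drop (m + 1)    -- evens[m+1:] (= PySem.List.slice evens (some (m+1)) none, lemma slice_from_natCast)
      let fr := bFor cs res acc
      (match cs.getLast? with          -- if cs and cs[-1] < 0
       | some c => if c < 0 then fr.1 ++ [2] else fr.1
       | none => fr.1, fr.2)

-- ===== PRECONDITION & SPEC =====
-- Pre_ excludes only the empty list, on which the Python A raises ValueError (max of an empty sequence); B raises there too.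
def Pre_calc_py (A : List Int) : Prop := A ≠ []
instance (A : List Int) : Decidable (Pre_calc_py A) := by unfold Pre_calc_py; infer_instance
def pvWitness_calc_py : List Int := [1, -2, 3]

def Spec_calc_py (A : List Int) (out : List Int × Int) : Prop := out = calc_py_alt A
instance (A : List Int) (out : List Int × Int) : Decidable (Spec_calc_py A out) := by unfold Spec_calc_py; infer_instance

-- ===== CLAIM (what is proved, stated in full; the proofs are below) =====
def Claim_equal_calc_py : Prop := ∀ (A : List Int), Dom_calc_py A → Pre_calc_py A → Spec_calc_py A (calc_py A)

-- ===== LEMMAS AND PROOFS =====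

theorem pyStep2_head? (l : List Int) : (pyStep2 l).head? = l.head? := by
  match l with
  | [] => rfl
  | [x] => rfl
  | x :: y :: t => rfl

theorem pyStep2_ne_nil (l : List Int) (h : l ≠ []) : pyStep2 l ≠ [] := by
  match l with
  | [] => exact absurd rfl h
  | [x] => simp [pyStep2]
  | x :: y :: t => simp [pyStep2]

theorem mem_of_mem_pyStep2 (x : Int) (l : List Int) (h : x ∈ pyStep2 l) : x ∈ l := by
  induction l using pyStep2.induct with
  | case1 => simpa [pyStep2] using h
  | case2 a => simp [pyStep2] at h; exact List.mem_cons.mpr (Or.inl h)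
  | case3 a b t ih =>
      simp only [pyStep2, List.mem_cons] at h ⊢
      rcases h with h | h
      · exact Or.inl h
      · exact Or.inr (Or.inr (ih h))

theorem pyStep2_drop_two (l : List Int) : pyStep2 (l.drop 2) = (pyStep2 l).drop 1 := by
  match l with
  | [] => rfl
  | [x] => rfl
  | x :: y :: t => rfl

theorem pyStep2_drop (m : Nat) (l : List Int) : pyStep2 (l.drop (2 * m)) = (pyStep2 l).drop m := by
  induction m generalizing l with
  | zero => simp
  | succ k ih =>
      have h1 : (l.drop 2).drop (2 * k) = l.drop (2 * (k + 1)) := by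
        rw [List.drop_drop]; congr 1; omega
      calc pyStep2 (l.drop (2 * (k + 1))) = pyStep2 ((l.drop 2).drop (2 * k)) := by rw [h1]
        _ = (pyStep2 (l.drop 2)).drop k := ih _
        _ = ((pyStep2 l).drop 1).drop k := by rw [pyStep2_drop_two]
        _ = (pyStep2 l).drop (k + 1) := by rw [List.drop_drop]; congr 1; omega

theorem bWhileM_add (l : List Int) (m : Nat) : bWhileM l m = m + bWhileM l 0 := by
  induction l generalizing m with
  | nil => rfl
  | cons a t ih =>
      simp only [bWhileM]
      by_cases h : a < 0
      · rw [if_pos h, if_pos h, ih (m + 1), ih 1]; omega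
      · rw [if_neg h, if_neg h]; omega

theorem aScan_eq (ma : Int) (l : List Int) (i : Nat) (res : List Int) (h : ma ∈ l) :
    aScan ma l i res = (i + (PySem.List.index? l ma).getD 0,
      res ++ List.replicate ((PySem.List.index? l ma).getD 0) (1 : Int)) := by
  induction l generalizing i res with
  | nil => exact absurd h (by simp)
  | cons a t ih =>
      simp only [aScan]
      by_cases ha : a = ma
      · subst ha
        rw [if_pos rfl, PySem.List.index?_cons_self]
        simp
      · rw [if_neg ha, PySem.List.index?_cons_of_ne _ ha]
        have hmt : ma ∈ t := by
          rcases List.mem_cons.mp h with h' | h'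
          · exact absurd h'.symm ha
          · exact h'
        obtain ⟨k, hk⟩ : ∃ k, PySem.List.index? t ma = some k := by
          cases hi : PySem.List.index? t ma with
          | none => exact absurd hmt ((PySem.List.index?_eq_none_iff _ _).mp hi)
          | some k => exact ⟨k, rfl⟩
        rw [ih (i + 1) (res ++ [1]) hmt, hk]
        simp [List.replicate_succ]
        omega

theorem desc_list (c : Int) (m : Nat) :
    (List.range (m + 1)).map (fun (k : Nat) => c - (k : Int))
      = c :: (List.range m).map (fun (k : Nat) => c - 1 - (k : Int)) := by
  induction m with
  | zero => simp
  | succ n ih =>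
      rw [List.range_succ, List.map_append, ih, List.range_succ, List.map_append]
      simp only [List.map_cons, List.map_nil, List.cons_append]
      have hc : c - (((n + 1 : Nat)) : Int) = c - 1 - (n : Int) := by push_cast; ring
      rw [hc]

theorem aJLoop_eq (i : Nat) (j : Nat) (res : List Int) :
    aJLoop i j res = res ++ (PySem.List.pyRange 0 ((j : Int) - (i : Int) - 1) 1).map
      (fun t => (j : Int) - (i : Int) - t) := by
  induction j using Nat.strong_induction_on generalizing res with
  | _ j ih =>
      rw [aJLoop]
      by_cases hij : i < j - 1
      · rw [if_pos hij, ih (j - 1) (by omega)]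
        rw [PySem.List.pyRange_one, PySem.List.pyRange_one]
        have h1 : ((j : Int) - (i : Int) - 1 - 0).toNat = (j - i - 2) + 1 := by omega
        have h2 : (((j - 1 : Nat) : Int) - (i : Int) - 1 - 0).toNat = j - i - 2 := by omega
        have hj : (((j : Nat) - 1 : Nat) : Int) = (j : Int) - 1 := by omega
        rw [h1, h2]
        simp only [List.map_map, List.append_assoc, List.singleton_append, hj, zero_add]
        simp only [Function.comp_def]
        rw [desc_list ((j : Int) - (i : Int)) (j - i - 2)]
        congr 2
        apply List.map_congr_left
        intro k _
        ring
      · rw [if_neg hij]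
        have : ((j : Int) - (i : Int) - 1 - 0).toNat = 0 := by omega
        rw [PySem.List.pyRange_one, this]
        simp

theorem aNegLoop_eq (l : List Int) (res : List Int) :
    aNegLoop l res = (l.drop (2 * bWhileM (pyStep2 l) 0),
      res ++ (List.replicate (bWhileM (pyStep2 l) 0) ([1, 1] : List Int)).flatten) := by
  induction l using pyStep2.induct generalizing res with
  | case1 => simp [aNegLoop, pyStep2, bWhileM]
  | case2 x =>
      by_cases hx : x < 0
      · simp [aNegLoop, pyStep2, bWhileM, hx]
      · simp [aNegLoop, pyStep2, bWhileM, hx]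
  | case3 x y t ih =>
      by_cases hx : x < 0
      · simp only [aNegLoop, if_pos hx, List.drop_succ_cons, List.drop_zero]
        rw [ih]
        simp only [pyStep2, bWhileM, if_pos hx, bWhileM_add (pyStep2 t) 1]
        rw [show 2 * (1 + bWhileM (pyStep2 t) 0) = (2 * bWhileM (pyStep2 t) 0) + 1 + 1 from by omega,
            show 1 + bWhileM (pyStep2 t) 0 = bWhileM (pyStep2 t) 0 + 1 from by omega]
        simp [List.replicate_succ, List.drop_succ_cons]
      · simp [aNegLoop, pyStep2, bWhileM, hx]

theorem aMainLoop_eq (C : List Int) (hodd : C.length % 2 = 1) (a0 a1 : Int) (res : List Int) :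
    (if (aMainLoop (a0 :: a1 :: C) res).1.length > 1
       then (aMainLoop (a0 :: a1 :: C) res).2 ++ [2]
       else (aMainLoop (a0 :: a1 :: C) res).2,
     (PySem.List.pyGet? (aMainLoop (a0 :: a1 :: C) res).1 0).getD 0)
    = (match (pyStep2 C).getLast? with
       | some c => if c < 0 then (bFor (pyStep2 C) res a0).1 ++ [2] else (bFor (pyStep2 C) res a0).1
       | none => (bFor (pyStep2 C) res a0).1,
       (bFor (pyStep2 C) res a0).2) := by
  induction C using pyStep2.induct generalizing a0 a1 res with
  | case1 => simp at hodd
  | case2 c =>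
      by_cases hc : c < 0
      · simp [aMainLoop, hc, bFor, pyStep2]
      · simp [aMainLoop, hc, bFor, pyStep2, Int.add_comm]
  | case3 c d t ih =>
      have ht : t.length % 2 = 1 := by simp at hodd; omega
      have htne : t ≠ [] := by intro h; rw [h] at ht; simp at ht
      obtain ⟨e, tl, hcs⟩ : ∃ e tl, pyStep2 t = e :: tl := by
        cases h : pyStep2 t with
        | nil => exact absurd h (pyStep2_ne_nil t htne)
        | cons e tl => exact ⟨e, tl, rfl⟩
      have hlen : 0 < t.length := List.length_pos_iff.mpr htne
      by_cases hc : c < 0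
      · have hstep : aMainLoop (a0 :: a1 :: c :: d :: t) res = aMainLoop (a0 :: a1 :: t) (res ++ [3]) := by
          rw [aMainLoop]
          simp only [if_pos hc, List.length_cons, List.drop_succ_cons, List.drop_zero]
          rw [if_pos (by omega)]
        rw [hstep, ih ht a0 a1 (res ++ [3])]
        simp only [pyStep2, hcs, bFor, List.foldl_cons, if_pos hc, List.getLast?_cons_cons]
      · have hstep : aMainLoop (a0 :: a1 :: c :: d :: t) res = aMainLoop ((c + a0) :: d :: t) (res ++ [2]) := by
          rw [aMainLoop]
          simp only [if_neg hc]
        rw [hstep, ih ht (c + a0) d (res ++ [2])]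
        simp only [pyStep2, hcs, bFor, List.foldl_cons, if_neg hc, List.getLast?_cons_cons,
          Int.add_comm]

theorem branchA (T : List Int) (res0 : List Int) (hT : T ≠ []) :
    (aJLoop (aScan ((PySem.List.max? (pyStep2 T) (fun y => y)).getD 0) T 0 res0).1 T.length
       (aScan ((PySem.List.max? (pyStep2 T) (fun y => y)).getD 0) T 0 res0).2,
     (PySem.List.max? (pyStep2 T) (fun y => y)).getD 0)
    = (res0 ++ List.replicate ((PySem.List.index? T ((PySem.List.max? (pyStep2 T) (fun y => y)).getD 0)).getD 0) (1 : Int)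
         ++ (PySem.List.pyRange 0 ((T.length : Int) - ((PySem.List.index? T ((PySem.List.max? (pyStep2 T) (fun y => y)).getD 0)).getD 0 : Nat) - 1) 1).map
              (fun t => (T.length : Int) - ((PySem.List.index? T ((PySem.List.max? (pyStep2 T) (fun y => y)).getD 0)).getD 0 : Nat) - t),
       (PySem.List.max? (pyStep2 T) (fun y => y)).getD 0) := by
  obtain ⟨m0, hm0⟩ : ∃ m0, PySem.List.max? (pyStep2 T) (fun y => y) = some m0 := by
    cases h : PySem.List.max? (pyStep2 T) (fun y => y) with
    | none => exact absurd ((PySem.List.max?_eq_none_iff _ _).mp h) (pyStep2_ne_nil T hT)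
    | some m0 => exact ⟨m0, rfl⟩
  have hmem : (PySem.List.max? (pyStep2 T) (fun y => y)).getD 0 ∈ T := by
    rw [hm0]
    exact mem_of_mem_pyStep2 _ _ (PySem.List.max?_mem hm0)
  rw [aScan_eq _ _ _ _ hmem, aJLoop_eq]
  simp [List.append_assoc]

theorem branchB (T : List Int) (res0 : List Int) (hodd : T.length % 2 = 1) :
    (if (aMainLoop (aNegLoop T res0).1 (aNegLoop T res0).2).1.length > 1
       then (aMainLoop (aNegLoop T res0).1 (aNegLoop T res0).2).2 ++ [2]
       else (aMainLoop (aNegLoop T res0).1 (aNegLoop T res0).2).2,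
     (PySem.List.pyGet? (aMainLoop (aNegLoop T res0).1 (aNegLoop T res0).2).1 0).getD 0)
    = (match ((pyStep2 T).drop (bWhileM (pyStep2 T) 0 + 1)).getLast? with
       | some c => if c < 0
           then (bFor ((pyStep2 T).drop (bWhileM (pyStep2 T) 0 + 1))
                   (res0 ++ (List.replicate (bWhileM (pyStep2 T) 0) ([1, 1] : List Int)).flatten)
                   ((PySem.List.pyGet? (pyStep2 T) ((bWhileM (pyStep2 T) 0 : Nat) : Int)).getD 0)).1 ++ [2]
           else (bFor ((pyStep2 T).drop (bWhileM (pyStep2 T) 0 + 1))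
                   (res0 ++ (List.replicate (bWhileM (pyStep2 T) 0) ([1, 1] : List Int)).flatten)
                   ((PySem.List.pyGet? (pyStep2 T) ((bWhileM (pyStep2 T) 0 : Nat) : Int)).getD 0)).1
       | none => (bFor ((pyStep2 T).drop (bWhileM (pyStep2 T) 0 + 1))
                   (res0 ++ (List.replicate (bWhileM (pyStep2 T) 0) ([1, 1] : List Int)).flatten)
                   ((PySem.List.pyGet? (pyStep2 T) ((bWhileM (pyStep2 T) 0 : Nat) : Int)).getD 0)).1,
       (bFor ((pyStep2 T).drop (bWhileM (pyStep2 T) 0 + 1))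
         (res0 ++ (List.replicate (bWhileM (pyStep2 T) 0) ([1, 1] : List Int)).flatten)
         ((PySem.List.pyGet? (pyStep2 T) ((bWhileM (pyStep2 T) 0 : Nat) : Int)).getD 0)).2) := by
  rw [aNegLoop_eq]
  set m := bWhileM (pyStep2 T) 0 with hm
  set res1 := res0 ++ (List.replicate m ([1, 1] : List Int)).flatten with hres1
  have hD : pyStep2 (T.drop (2 * m)) = (pyStep2 T).drop m := pyStep2_drop m T
  have hacc : (PySem.List.pyGet? (pyStep2 T) ((m : Nat) : Int)).getD 0
      = ((T.drop (2 * m)).head?).getD 0 := by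
    rw [PySem.List.pyGet?_natCast, ← List.head?_drop, ← hD, pyStep2_head?]
  have hcs : (pyStep2 T).drop (m + 1) = (pyStep2 (T.drop (2 * m))).drop 1 := by
    rw [hD, List.drop_drop]
  have hDlen : (T.drop (2 * m)).length = T.length - 2 * m := List.length_drop
  rcases hcase : T.drop (2 * m) with _ | ⟨d0, D'⟩
  · rw [hcase] at hacc hcs
    simp only [pyStep2, List.drop_nil] at hcs
    simp [aMainLoop, bFor, hcs]
    rw [← PySem.List.pyGet?_natCast, hacc]
    simp [PySem.List.pyGet?]
  · rcases D' with _ | ⟨d1, Ct⟩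
    · rw [hcase] at hacc hcs
      simp only [pyStep2, List.drop_succ_cons, List.drop_zero] at hcs
      simp only [List.head?_cons, Option.getD_some] at hacc
      simp [aMainLoop, bFor, hcs]
      rw [← PySem.List.pyGet?_natCast, hacc]
    · have hCt : Ct.length % 2 = 1 := by
        rw [hcase] at hDlen
        simp at hDlen
        omega
      rw [hcase] at hacc hcs
      simp only [List.head?_cons, Option.getD_some] at hacc
      have h2 : pyStep2 (d0 :: d1 :: Ct) = d0 :: pyStep2 Ct := rfl
      rw [h2] at hcs
      simp only [List.drop_succ_cons, List.drop_zero] at hcs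
      rw [aMainLoop_eq Ct hCt d0 d1 res1, hcs, hacc]

-- ===== VERDICT (by name: the statement is the Claim_ definition above) =====
theorem calc_py_spec : Claim_equal_calc_py := by
  intro A _ hPre
  unfold Spec_calc_py
  have h0 : A.length ≠ 0 := by
    intro h
    exact hPre (List.eq_nil_of_length_eq_zero h)
  simp only [calc_py, calc_py_alt]
  by_cases h1 : A.length = 1
  · rw [if_pos h1, if_pos h1]
  · rw [if_neg h1, if_neg h1]
    by_cases hp : A.length % 2 = 0
    · simp only [if_pos hp]
      rw [← List.dropLast_eq_take]
      have hT : A.dropLast ≠ [] := by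
        rw [← List.length_pos_iff, List.length_dropLast]
        omega
      have hodd : A.dropLast.length % 2 = 1 := by
        rw [List.length_dropLast]
        omega
      rw [show (A.length - 1 : Nat) = A.dropLast.length from (List.length_dropLast).symm]
      by_cases hall : ((pyStep2 A.dropLast).all (fun a => a ≤ 0)) = true
      · rw [if_pos hall, if_pos hall]
        exact branchA A.dropLast [(A.length : Int)] hT
      · rw [if_neg hall, if_neg hall]
        exact branchB A.dropLast [(A.length : Int)] hodd
    · simp only [if_neg hp]
      rw [List.take_length]
      have hodd : A.length % 2 = 1 := by omega
      by_cases hall : ((pyStep2 A).all (fun a => a ≤ 0)) = true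
      · rw [if_pos hall, if_pos hall]
        exact branchA A [] hPre
      · rw [if_neg hall, if_neg hall]
        exact branchB A [] hodd
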